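-- pv_equiv track=rewrite | github.com/omermacitt/LoLAutomation | api.py | is_picked
-- ===== SOURCE A (Python) =====
-- from typing import Any
--
-- def is_picked(session: dict[str, Any], champ_id: int) -> bool:
--     """Şampiyon seçim ekranında champ_id'nin picklenmiş olup olmadığını döndürür."""
--     try:
--         champ_id_int = int(champ_id)
--     except (TypeError, ValueError):
--         return False
--
--     for team_key in ("myTeam", "theirTeam"):
--         for player in session.get(team_key, []) or []:
--             if not isinstance(player, dict):
--                 continue
--             try:
--                 picked = int(player.get("championId") or 0)
--             except (TypeError, ValueError):
--                 picked = 0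
--             if picked == champ_id_int and champ_id_int != 0:
--                 return True
--
--     return False
-- ===== SOURCE B (Python) =====
-- def _contains_pick(players, target):
--     """Recursively check whether any player in the roster picked `target`."""
--     if not players:
--         return False
--     head, rest = players[0], players[1:]
--     if isinstance(head, dict):
--         try:
--             picked = int(head.get("championId") or 0)
--         except (TypeError, ValueError):
--             picked = 0
--     else:
--         picked = 0
--     return picked == target or _contains_pick(rest, target)
--
--
-- def is_picked(session, champ_id):
--     """Şampiyon seçim ekranında champ_id'nin picklenmiş olup olmadığını döndürür."""
--     try:
--         target = int(champ_id)
--     except (TypeError, ValueError):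
--         return False
--     if target == 0:
--         return False
--     roster = list(session.get("myTeam") or []) + list(session.get("theirTeam") or [])
--     return _contains_pick(roster, target)
-- ===== Notes on version B (the rewrite author's own statement) =====
-- stated objective: alternative
-- what changed: Replaced A's nested loops over team keys with inline compare-and-early-return by: hoisting the champ_id==0 guard before any scan, flattening both teams into a single roster once, and a recursive head/rest helper that answers by a short-circuit disjunction (non-dict players contribute pick 0, which can never match since the zero target was ruled out).
import Mathlib
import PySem

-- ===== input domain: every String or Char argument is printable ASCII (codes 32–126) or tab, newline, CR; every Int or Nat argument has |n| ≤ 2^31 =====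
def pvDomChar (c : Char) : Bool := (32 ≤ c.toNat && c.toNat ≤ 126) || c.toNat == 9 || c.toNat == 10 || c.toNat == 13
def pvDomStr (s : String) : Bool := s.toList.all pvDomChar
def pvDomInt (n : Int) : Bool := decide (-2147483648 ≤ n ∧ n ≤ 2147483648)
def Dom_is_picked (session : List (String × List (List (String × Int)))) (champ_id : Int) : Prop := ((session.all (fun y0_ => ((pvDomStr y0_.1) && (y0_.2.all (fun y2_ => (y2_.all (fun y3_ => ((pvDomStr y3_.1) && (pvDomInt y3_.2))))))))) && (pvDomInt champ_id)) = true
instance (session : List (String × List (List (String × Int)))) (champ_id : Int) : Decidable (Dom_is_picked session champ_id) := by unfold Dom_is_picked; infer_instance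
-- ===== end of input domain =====

-- B hoists the zero guard, flattens both teams into one roster, and recurses over it (objective: alternative decomposition, same cost).
-- ===== PORT A =====
-- A: for each team key, scan the players and return True on the first player whose
-- picked id equals champ_id_int with champ_id_int != 0; List.any mirrors the
-- short-circuiting for-loops with early return. int(champ_id) never raises on an Int;
-- 'player.get("championId") or 0' is getD with default 0 (None -> 0, 0 -> 0).
def is_picked (session : List (String × List (List (String × Int)))) (champ_id : Int) : Bool :=
  (["myTeam", "theirTeam"] : List String).any (fun team_key =>
    (PySem.Dict.getD (PySem.Dict.mk session) team_key []).any (fun player =>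
      let picked := PySem.Dict.getD (PySem.Dict.mk player) "championId" 0
      picked == champ_id && champ_id != 0))

-- ===== PORT B =====
-- B's recursive helper _contains_pick: head/rest recursion with a short-circuit 'or'.
def containsPick : List (List (String × Int)) → Int → Bool
  | [], _ => false
  | head :: rest, target =>
      (PySem.Dict.getD (PySem.Dict.mk head) "championId" 0 == target) || containsPick rest target

def is_picked_alt (session : List (String × List (List (String × Int)))) (champ_id : Int) : Bool :=
  if champ_id == 0 then false
  else
    let roster := PySem.Dict.getD (PySem.Dict.mk session) "myTeam" []
                    ++ PySem.Dict.getD (PySem.Dict.mk session) "theirTeam" []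
    containsPick roster champ_id

-- ===== PRECONDITION & SPEC =====
def Spec_is_picked (session : List (String × List (List (String × Int)))) (champ_id : Int) (out : Bool) : Prop := out = is_picked_alt session champ_id
instance (session : List (String × List (List (String × Int)))) (champ_id : Int) (out : Bool) : Decidable (Spec_is_picked session champ_id out) := by unfold Spec_is_picked; infer_instance

-- ===== CLAIM (what is proved, stated in full; the proofs are below) =====
def Claim_equal_is_picked : Prop := ∀ (session : List (String × List (List (String × Int)))) (champ_id : Int), Dom_is_picked session champ_id → Spec_is_picked session champ_id (is_picked session champ_id)

-- ===== LEMMAS AND PROOFS =====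
theorem containsPick_eq_any (l : List (List (String × Int))) (t : Int) :
    containsPick l t = l.any (fun p => PySem.Dict.getD (PySem.Dict.mk p) "championId" 0 == t) := by
  induction l with
  | nil => rfl
  | cons p rest ih => simp [containsPick, ih]

-- ===== VERDICT (by name: the statement is the Claim_ definition above) =====
theorem is_picked_spec : Claim_equal_is_picked := by
  intro session champ_id _
  unfold Spec_is_picked is_picked is_picked_alt
  by_cases h0 : champ_id = 0
  · simp [h0]
  · have hz : (champ_id != 0) = true := by simp [bne, h0]
    simp only [beq_iff_eq, if_neg h0, containsPick_eq_any, List.any_append,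
      List.any_cons, List.any_nil, hz, Bool.and_true, Bool.or_false]
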